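-- pv_equiv track=rewrite | github.com/renvvvvv/dco-skillhub | backend/app/org_mapping.py | get_dcs_by_region
-- ===== SOURCE A (Python) =====
-- IDC_DATACENTERS = {
--     # 华北一区 (hb1) - 11个
--     "hb1-hb1": {"name": "HB1（北京B28数据中心）", "region_id": "hb1", "short": "HB1"},
--     "hb1-hb5": {"name": "HB5（北京M3数据中心）", "region_id": "hb1", "short": "HB5"},
--     "hb1-hbdw1": {"name": "HBDW1（北京M5数据中心）", "region_id": "hb1", "short": "HBDW1"},
--     "hb1-hb4": {"name": "HB4（北京M6V数据中心）", "region_id": "hb1", "short": "HB4"},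
--     "hb1-hb3": {"name": "HB3（北京M6数据中心）", "region_id": "hb1", "short": "HB3"},
--     "hb1-hbdw2": {"name": "HBDW2（北京海淀联通五棵松数据中心）", "region_id": "hb1", "short": "HBDW2"},
--     "hb1-hb6": {"name": "HB6（北京顺义腾仁数据中心）", "region_id": "hb1", "short": "HB6"},
--     "hb1-hb25": {"name": "HB25（河北怀来基地数据中心）", "region_id": "hb1", "short": "HB25"},
--     "hb1-hbdw3": {"name": "HBDW3（泰康保险数据中心）", "region_id": "hb1", "short": "HBDW3"},
--     "hb1-hb22": {"name": "HB22（陕西西安凤竹数据中心）", "region_id": "hb1", "short": "HB22"},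
--     "hb1-hb7": {"name": "HB7（陕西西安经开数据中心）", "region_id": "hb1", "short": "HB7"},
--     # 华北二区 (hb2) - 7个
--     "hb2-hb15": {"name": "HB15（三河铭泰数据中心）", "region_id": "hb2", "short": "HB15"},
--     "hb2-hb21": {"name": "HB21（北京东部数据中心）", "region_id": "hb2", "short": "HB21"},
--     "hb2-hb11": {"name": "HB11（北京亦庄博兴数据中心）", "region_id": "hb2", "short": "HB11"},
--     "hb2-hb10": {"name": "HB10（北京亦庄同济中路数据中心）", "region_id": "hb2", "short": "HB10"},
--     "hb2-hb12": {"name": "HB12（北京大兴星光影视城数据中心）", "region_id": "hb2", "short": "HB12"},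
--     "hb2-hb13": {"name": "HB13（北京通州马驹桥数据中心）", "region_id": "hb2", "short": "HB13"},
--     "hb2-hbdw4": {"name": "HBDW4（河北廊坊高新互联数据中心）", "region_id": "hb2", "short": "HBDW4"},
--     # 华北三区 (hb3) - 6个
--     "hb3-hbdw5": {"name": "HBDW5（乌兰1号基地数据中心）", "region_id": "hb3", "short": "HBDW5"},
--     "hb3-hbdw6": {"name": "HBDW6（乌兰2号基地数据中心）", "region_id": "hb3", "short": "HBDW6"},
--     "hb3-hb19": {"name": "HB19（乌兰3号基地数据中心）", "region_id": "hb3", "short": "HB19"},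
--     "hb3-hb20": {"name": "HB20（乌兰4号基地数据中心）", "region_id": "hb3", "short": "HB20"},
--     "hb3-hbdw7": {"name": "HBDW7（乌兰5号基地数据中心）", "region_id": "hb3", "short": "HBDW7"},
--     "hb3-hb24": {"name": "HB24（乌兰6号基地数据中心）", "region_id": "hb3", "short": "HB24"},
--     # 华东一区 (hd1) - 11个
--     "hd1-hd4": {"name": "HD4（上海外高桥数据中心）", "region_id": "hd1", "short": "HD4"},
--     "hd1-hd3": {"name": "HD3（上海松江数据中心）", "region_id": "hd1", "short": "HD3"},
--     "hd1-hddw1": {"name": "HDDW1（上海磐石智算数据中心）", "region_id": "hd1", "short": "HDDW1"},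
--     "hd1-hd1": {"name": "HD1（上海纪蕴数据中心）", "region_id": "hd1", "short": "HD1"},
--     "hd1-hd6": {"name": "HD6（上海荷丹数据中心）", "region_id": "hd1", "short": "HD6"},
--     "hd1-hd5": {"name": "HD5（上海金港数据中心）", "region_id": "hd1", "short": "HD5"},
--     "hd1-hd9": {"name": "HD9（安徽宿州高新区数据中心）", "region_id": "hd1", "short": "HD9"},
--     "hd1-hd8": {"name": "HD8（江苏南通保税区数据中心）", "region_id": "hd1", "short": "HD8"},
--     "hd1-hd15": {"name": "HD15（江苏昆山数据中心）", "region_id": "hd1", "short": "HD15"},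
--     "hd1-hd11": {"name": "HD11（浙江杭州下沙数据中心）", "region_id": "hd1", "short": "HD11"},
--     "hd1-hd13": {"name": "HD13（浙江杭州央广云数据中心）", "region_id": "hd1", "short": "HD13"},
--     # 华东二区 (hd2) - 1个
--     "hd2-hd7": {"name": "HD7（江苏太仓基地数据中心）", "region_id": "hd2", "short": "HD7"},
--     # 华南区 (hn) - 12个
--     "hn-hn6": {"name": "HN6（四川广元电信数据中心）", "region_id": "hn", "short": "HN6"},
--     "hn-hn8": {"name": "HN8（四川成都双流算力平台数据中心）", "region_id": "hn", "short": "HN8"},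
--     "hn-hndw5": {"name": "HNDW5（四川成都天府联通数据中心）", "region_id": "hn", "short": "HNDW5"},
--     "hn-hn5": {"name": "HN5（四川成都棕树数据中心）", "region_id": "hn", "short": "HN5"},
--     "hn-hn4": {"name": "HN4（广东佛山智慧城市数据中心）", "region_id": "hn", "short": "HN4"},
--     "hn-hndw3": {"name": "HNDW3（广东广州亚太信息引擎数据中心）", "region_id": "hn", "short": "HNDW3"},
--     "hn-hndw1": {"name": "HNDW1（广东广州化龙数据中心）", "region_id": "hn", "short": "HNDW1"},
--     "hn-hn3": {"name": "HN3（广东广州科学城连云数据中心）", "region_id": "hn", "short": "HN3"},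
--     "hn-hndw4": {"name": "HNDW4（广东深圳盐田明珠数据中心）", "region_id": "hn", "short": "HNDW4"},
--     "hn-hndw2": {"name": "HNDW2（广东深圳盐田武浩数据中心）", "region_id": "hn", "short": "HNDW2"},
--     "hn-hn1": {"name": "HN1（广东深圳花园城数据中心）", "region_id": "hn", "short": "HN1"},
--     "hn-hn2": {"name": "HN2（广东深圳软件基地数据中心）", "region_id": "hn", "short": "HN2"},
--     # 杭钢 (hg) - 1个
--     "hg-hgdw1": {"name": "HGDW1（浙江杭州杭钢云计算数据中心）", "region_id": "hg", "short": "HGDW1"},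
--     # 香山 (xs) - 1个
--     "xs-xs1": {"name": "XS1（北京香山数据中心）", "region_id": "xs", "short": "XS1"},
--     # 其他区域 (qt) - 常用映射
--     "qt-qt23": {"name": "QT23（北京朝阳酒仙桥百度M1数据中心）", "region_id": "qt", "short": "QT23"},
--     "qt-qt01": {"name": "QT01（河北廊坊云基地数据中心）", "region_id": "qt", "short": "QT01"},
--     "qt-qt11": {"name": "QT11（上海静安数据中心）", "region_id": "qt", "short": "QT11"},
--     "qt-qt27-17": {"name": "QT27（江苏苏州国科数据中心）", "region_id": "qt", "short": "QT27"},
--     "qt-hb201": {"name": "HB201（乌兰基地）", "region_id": "qt", "short": "HB201"},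
--     "qt-hb2": {"name": "HB2（河北廊坊固安数据中心）", "region_id": "qt", "short": "HB2"},
-- }
--
-- def get_dcs_by_region(region_id: str) -> list:
--     """获取指定区域下的所有数据中心"""
--     dcs = []
--     for did, info in IDC_DATACENTERS.items():
--         if info.get("region_id") == region_id:
--             dcs.append({
--                 "id": did,
--                 "name": info["name"],
--                 "short": info["short"],
--                 "region_id": region_id,
--             })
--     return sorted(dcs, key=lambda x: x["id"])
-- ===== SOURCE B (Python) =====
-- # B: per-region index precomputed at module scope, pre-sorted by did; each call is one
-- # dict lookup plus a map building fresh result dicts ("short" is the name's prefix before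
-- # the full-width paren, which holds for every entry of the fixed table).
-- REGION_INDEX = {
--     "hb1": [
--         ("hb1-hb1", "HB1（北京B28数据中心）"),
--         ("hb1-hb22", "HB22（陕西西安凤竹数据中心）"),
--         ("hb1-hb25", "HB25（河北怀来基地数据中心）"),
--         ("hb1-hb3", "HB3（北京M6数据中心）"),
--         ("hb1-hb4", "HB4（北京M6V数据中心）"),
--         ("hb1-hb5", "HB5（北京M3数据中心）"),
--         ("hb1-hb6", "HB6（北京顺义腾仁数据中心）"),
--         ("hb1-hb7", "HB7（陕西西安经开数据中心）"),
--         ("hb1-hbdw1", "HBDW1（北京M5数据中心）"),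
--         ("hb1-hbdw2", "HBDW2（北京海淀联通五棵松数据中心）"),
--         ("hb1-hbdw3", "HBDW3（泰康保险数据中心）"),
--     ],
--     "hb2": [
--         ("hb2-hb10", "HB10（北京亦庄同济中路数据中心）"),
--         ("hb2-hb11", "HB11（北京亦庄博兴数据中心）"),
--         ("hb2-hb12", "HB12（北京大兴星光影视城数据中心）"),
--         ("hb2-hb13", "HB13（北京通州马驹桥数据中心）"),
--         ("hb2-hb15", "HB15（三河铭泰数据中心）"),
--         ("hb2-hb21", "HB21（北京东部数据中心）"),
--         ("hb2-hbdw4", "HBDW4（河北廊坊高新互联数据中心）"),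
--     ],
--     "hb3": [
--         ("hb3-hb19", "HB19（乌兰3号基地数据中心）"),
--         ("hb3-hb20", "HB20（乌兰4号基地数据中心）"),
--         ("hb3-hb24", "HB24（乌兰6号基地数据中心）"),
--         ("hb3-hbdw5", "HBDW5（乌兰1号基地数据中心）"),
--         ("hb3-hbdw6", "HBDW6（乌兰2号基地数据中心）"),
--         ("hb3-hbdw7", "HBDW7（乌兰5号基地数据中心）"),
--     ],
--     "hd1": [
--         ("hd1-hd1", "HD1（上海纪蕴数据中心）"),
--         ("hd1-hd11", "HD11（浙江杭州下沙数据中心）"),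
--         ("hd1-hd13", "HD13（浙江杭州央广云数据中心）"),
--         ("hd1-hd15", "HD15（江苏昆山数据中心）"),
--         ("hd1-hd3", "HD3（上海松江数据中心）"),
--         ("hd1-hd4", "HD4（上海外高桥数据中心）"),
--         ("hd1-hd5", "HD5（上海金港数据中心）"),
--         ("hd1-hd6", "HD6（上海荷丹数据中心）"),
--         ("hd1-hd8", "HD8（江苏南通保税区数据中心）"),
--         ("hd1-hd9", "HD9（安徽宿州高新区数据中心）"),
--         ("hd1-hddw1", "HDDW1（上海磐石智算数据中心）"),
--     ],
--     "hd2": [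
--         ("hd2-hd7", "HD7（江苏太仓基地数据中心）"),
--     ],
--     "hn": [
--         ("hn-hn1", "HN1（广东深圳花园城数据中心）"),
--         ("hn-hn2", "HN2（广东深圳软件基地数据中心）"),
--         ("hn-hn3", "HN3（广东广州科学城连云数据中心）"),
--         ("hn-hn4", "HN4（广东佛山智慧城市数据中心）"),
--         ("hn-hn5", "HN5（四川成都棕树数据中心）"),
--         ("hn-hn6", "HN6（四川广元电信数据中心）"),
--         ("hn-hn8", "HN8（四川成都双流算力平台数据中心）"),
--         ("hn-hndw1", "HNDW1（广东广州化龙数据中心）"),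
--         ("hn-hndw2", "HNDW2（广东深圳盐田武浩数据中心）"),
--         ("hn-hndw3", "HNDW3（广东广州亚太信息引擎数据中心）"),
--         ("hn-hndw4", "HNDW4（广东深圳盐田明珠数据中心）"),
--         ("hn-hndw5", "HNDW5（四川成都天府联通数据中心）"),
--     ],
--     "hg": [
--         ("hg-hgdw1", "HGDW1（浙江杭州杭钢云计算数据中心）"),
--     ],
--     "xs": [
--         ("xs-xs1", "XS1（北京香山数据中心）"),
--     ],
--     "qt": [
--         ("qt-hb2", "HB2（河北廊坊固安数据中心）"),
--         ("qt-hb201", "HB201（乌兰基地）"),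
--         ("qt-qt01", "QT01（河北廊坊云基地数据中心）"),
--         ("qt-qt11", "QT11（上海静安数据中心）"),
--         ("qt-qt23", "QT23（北京朝阳酒仙桥百度M1数据中心）"),
--         ("qt-qt27-17", "QT27（江苏苏州国科数据中心）"),
--     ],
-- }
--
-- def get_dcs_by_region(region_id: str) -> list:
--     """获取指定区域下的所有数据中心"""
--     return [
--         {"id": did, "name": name, "short": name.split("（")[0], "region_id": region_id}
--         for did, name in REGION_INDEX.get(region_id, [])
--     ]
-- ===== Notes on version B (the rewrite author's own statement) =====
-- stated objective: alternative
-- what changed: B precomputes at module scope a REGION_INDEX mapping each region_id to its (did, name) pairs pre-grouped and pre-sorted by did, so each call is one dict lookup plus a map that builds the result dicts fresh (short recovered as the name's prefix before the full-width paren), replacing A's per-call full-table scan with filter and per-call sort.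
import Mathlib
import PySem

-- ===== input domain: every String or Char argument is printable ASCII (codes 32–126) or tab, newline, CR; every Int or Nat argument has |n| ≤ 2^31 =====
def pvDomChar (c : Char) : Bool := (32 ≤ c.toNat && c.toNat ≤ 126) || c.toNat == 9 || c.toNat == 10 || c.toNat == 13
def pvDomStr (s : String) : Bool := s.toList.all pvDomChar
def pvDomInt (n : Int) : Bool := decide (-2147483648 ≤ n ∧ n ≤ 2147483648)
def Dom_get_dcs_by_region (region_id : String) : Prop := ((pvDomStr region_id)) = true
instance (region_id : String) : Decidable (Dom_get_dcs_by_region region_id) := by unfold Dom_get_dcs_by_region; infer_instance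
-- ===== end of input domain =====

-- B replaces A's per-call full-table scan + filter + sort with a module-scope precomputed
-- region → pre-sorted (did, name) index; each call is one lookup plus a map that builds the
-- rows fresh (short = name's prefix before the full-width paren, true of every table entry).

-- ===== PORT A =====
def IDC_DATACENTERS : List (String × List (String × String)) := [
  ("hb1-hb1", [("name", "HB1（北京B28数据中心）"), ("region_id", "hb1"), ("short", "HB1")]),
  ("hb1-hb5", [("name", "HB5（北京M3数据中心）"), ("region_id", "hb1"), ("short", "HB5")]),
  ("hb1-hbdw1", [("name", "HBDW1（北京M5数据中心）"), ("region_id", "hb1"), ("short", "HBDW1")]),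
  ("hb1-hb4", [("name", "HB4（北京M6V数据中心）"), ("region_id", "hb1"), ("short", "HB4")]),
  ("hb1-hb3", [("name", "HB3（北京M6数据中心）"), ("region_id", "hb1"), ("short", "HB3")]),
  ("hb1-hbdw2", [("name", "HBDW2（北京海淀联通五棵松数据中心）"), ("region_id", "hb1"), ("short", "HBDW2")]),
  ("hb1-hb6", [("name", "HB6（北京顺义腾仁数据中心）"), ("region_id", "hb1"), ("short", "HB6")]),
  ("hb1-hb25", [("name", "HB25（河北怀来基地数据中心）"), ("region_id", "hb1"), ("short", "HB25")]),
  ("hb1-hbdw3", [("name", "HBDW3（泰康保险数据中心）"), ("region_id", "hb1"), ("short", "HBDW3")]),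
  ("hb1-hb22", [("name", "HB22（陕西西安凤竹数据中心）"), ("region_id", "hb1"), ("short", "HB22")]),
  ("hb1-hb7", [("name", "HB7（陕西西安经开数据中心）"), ("region_id", "hb1"), ("short", "HB7")]),
  ("hb2-hb15", [("name", "HB15（三河铭泰数据中心）"), ("region_id", "hb2"), ("short", "HB15")]),
  ("hb2-hb21", [("name", "HB21（北京东部数据中心）"), ("region_id", "hb2"), ("short", "HB21")]),
  ("hb2-hb11", [("name", "HB11（北京亦庄博兴数据中心）"), ("region_id", "hb2"), ("short", "HB11")]),
  ("hb2-hb10", [("name", "HB10（北京亦庄同济中路数据中心）"), ("region_id", "hb2"), ("short", "HB10")]),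
  ("hb2-hb12", [("name", "HB12（北京大兴星光影视城数据中心）"), ("region_id", "hb2"), ("short", "HB12")]),
  ("hb2-hb13", [("name", "HB13（北京通州马驹桥数据中心）"), ("region_id", "hb2"), ("short", "HB13")]),
  ("hb2-hbdw4", [("name", "HBDW4（河北廊坊高新互联数据中心）"), ("region_id", "hb2"), ("short", "HBDW4")]),
  ("hb3-hbdw5", [("name", "HBDW5（乌兰1号基地数据中心）"), ("region_id", "hb3"), ("short", "HBDW5")]),
  ("hb3-hbdw6", [("name", "HBDW6（乌兰2号基地数据中心）"), ("region_id", "hb3"), ("short", "HBDW6")]),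
  ("hb3-hb19", [("name", "HB19（乌兰3号基地数据中心）"), ("region_id", "hb3"), ("short", "HB19")]),
  ("hb3-hb20", [("name", "HB20（乌兰4号基地数据中心）"), ("region_id", "hb3"), ("short", "HB20")]),
  ("hb3-hbdw7", [("name", "HBDW7（乌兰5号基地数据中心）"), ("region_id", "hb3"), ("short", "HBDW7")]),
  ("hb3-hb24", [("name", "HB24（乌兰6号基地数据中心）"), ("region_id", "hb3"), ("short", "HB24")]),
  ("hd1-hd4", [("name", "HD4（上海外高桥数据中心）"), ("region_id", "hd1"), ("short", "HD4")]),
  ("hd1-hd3", [("name", "HD3（上海松江数据中心）"), ("region_id", "hd1"), ("short", "HD3")]),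
  ("hd1-hddw1", [("name", "HDDW1（上海磐石智算数据中心）"), ("region_id", "hd1"), ("short", "HDDW1")]),
  ("hd1-hd1", [("name", "HD1（上海纪蕴数据中心）"), ("region_id", "hd1"), ("short", "HD1")]),
  ("hd1-hd6", [("name", "HD6（上海荷丹数据中心）"), ("region_id", "hd1"), ("short", "HD6")]),
  ("hd1-hd5", [("name", "HD5（上海金港数据中心）"), ("region_id", "hd1"), ("short", "HD5")]),
  ("hd1-hd9", [("name", "HD9（安徽宿州高新区数据中心）"), ("region_id", "hd1"), ("short", "HD9")]),
  ("hd1-hd8", [("name", "HD8（江苏南通保税区数据中心）"), ("region_id", "hd1"), ("short", "HD8")]),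
  ("hd1-hd15", [("name", "HD15（江苏昆山数据中心）"), ("region_id", "hd1"), ("short", "HD15")]),
  ("hd1-hd11", [("name", "HD11（浙江杭州下沙数据中心）"), ("region_id", "hd1"), ("short", "HD11")]),
  ("hd1-hd13", [("name", "HD13（浙江杭州央广云数据中心）"), ("region_id", "hd1"), ("short", "HD13")]),
  ("hd2-hd7", [("name", "HD7（江苏太仓基地数据中心）"), ("region_id", "hd2"), ("short", "HD7")]),
  ("hn-hn6", [("name", "HN6（四川广元电信数据中心）"), ("region_id", "hn"), ("short", "HN6")]),
  ("hn-hn8", [("name", "HN8（四川成都双流算力平台数据中心）"), ("region_id", "hn"), ("short", "HN8")]),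
  ("hn-hndw5", [("name", "HNDW5（四川成都天府联通数据中心）"), ("region_id", "hn"), ("short", "HNDW5")]),
  ("hn-hn5", [("name", "HN5（四川成都棕树数据中心）"), ("region_id", "hn"), ("short", "HN5")]),
  ("hn-hn4", [("name", "HN4（广东佛山智慧城市数据中心）"), ("region_id", "hn"), ("short", "HN4")]),
  ("hn-hndw3", [("name", "HNDW3（广东广州亚太信息引擎数据中心）"), ("region_id", "hn"), ("short", "HNDW3")]),
  ("hn-hndw1", [("name", "HNDW1（广东广州化龙数据中心）"), ("region_id", "hn"), ("short", "HNDW1")]),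
  ("hn-hn3", [("name", "HN3（广东广州科学城连云数据中心）"), ("region_id", "hn"), ("short", "HN3")]),
  ("hn-hndw4", [("name", "HNDW4（广东深圳盐田明珠数据中心）"), ("region_id", "hn"), ("short", "HNDW4")]),
  ("hn-hndw2", [("name", "HNDW2（广东深圳盐田武浩数据中心）"), ("region_id", "hn"), ("short", "HNDW2")]),
  ("hn-hn1", [("name", "HN1（广东深圳花园城数据中心）"), ("region_id", "hn"), ("short", "HN1")]),
  ("hn-hn2", [("name", "HN2（广东深圳软件基地数据中心）"), ("region_id", "hn"), ("short", "HN2")]),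
  ("hg-hgdw1", [("name", "HGDW1（浙江杭州杭钢云计算数据中心）"), ("region_id", "hg"), ("short", "HGDW1")]),
  ("xs-xs1", [("name", "XS1（北京香山数据中心）"), ("region_id", "xs"), ("short", "XS1")]),
  ("qt-qt23", [("name", "QT23（北京朝阳酒仙桥百度M1数据中心）"), ("region_id", "qt"), ("short", "QT23")]),
  ("qt-qt01", [("name", "QT01（河北廊坊云基地数据中心）"), ("region_id", "qt"), ("short", "QT01")]),
  ("qt-qt11", [("name", "QT11（上海静安数据中心）"), ("region_id", "qt"), ("short", "QT11")]),
  ("qt-qt27-17", [("name", "QT27（江苏苏州国科数据中心）"), ("region_id", "qt"), ("short", "QT27")]),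
  ("qt-hb201", [("name", "HB201（乌兰基地）"), ("region_id", "qt"), ("short", "HB201")]),
  ("qt-hb2", [("name", "HB2（河北廊坊固安数据中心）"), ("region_id", "qt"), ("short", "HB2")])
]

def get_dcs_by_region (region_id : String) : List (List (String × String)) :=
  let dcs := IDC_DATACENTERS.foldl (fun dcs p =>
    if (PySem.Dict.mk p.2).get? "region_id" = some region_id then
      dcs ++ [[("id", p.1),
               ("name", (PySem.Dict.mk p.2).getD "name" ""),
               ("short", (PySem.Dict.mk p.2).getD "short" ""),
               ("region_id", region_id)]]
    else dcs) []
  PySem.List.sorted dcs (fun x => ((PySem.Dict.mk x).getD "id" "").toList) false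

-- ===== PORT B =====
-- Source B's module-scope literal index: region_id → its (did, name) pairs, pre-sorted by did
def REGION_INDEX : List (String × List (String × String)) := [
  ("hb1", [
    ("hb1-hb1", "HB1（北京B28数据中心）"),
    ("hb1-hb22", "HB22（陕西西安凤竹数据中心）"),
    ("hb1-hb25", "HB25（河北怀来基地数据中心）"),
    ("hb1-hb3", "HB3（北京M6数据中心）"),
    ("hb1-hb4", "HB4（北京M6V数据中心）"),
    ("hb1-hb5", "HB5（北京M3数据中心）"),
    ("hb1-hb6", "HB6（北京顺义腾仁数据中心）"),
    ("hb1-hb7", "HB7（陕西西安经开数据中心）"),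
    ("hb1-hbdw1", "HBDW1（北京M5数据中心）"),
    ("hb1-hbdw2", "HBDW2（北京海淀联通五棵松数据中心）"),
    ("hb1-hbdw3", "HBDW3（泰康保险数据中心）")]),
  ("hb2", [
    ("hb2-hb10", "HB10（北京亦庄同济中路数据中心）"),
    ("hb2-hb11", "HB11（北京亦庄博兴数据中心）"),
    ("hb2-hb12", "HB12（北京大兴星光影视城数据中心）"),
    ("hb2-hb13", "HB13（北京通州马驹桥数据中心）"),
    ("hb2-hb15", "HB15（三河铭泰数据中心）"),
    ("hb2-hb21", "HB21（北京东部数据中心）"),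
    ("hb2-hbdw4", "HBDW4（河北廊坊高新互联数据中心）")]),
  ("hb3", [
    ("hb3-hb19", "HB19（乌兰3号基地数据中心）"),
    ("hb3-hb20", "HB20（乌兰4号基地数据中心）"),
    ("hb3-hb24", "HB24（乌兰6号基地数据中心）"),
    ("hb3-hbdw5", "HBDW5（乌兰1号基地数据中心）"),
    ("hb3-hbdw6", "HBDW6（乌兰2号基地数据中心）"),
    ("hb3-hbdw7", "HBDW7（乌兰5号基地数据中心）")]),
  ("hd1", [
    ("hd1-hd1", "HD1（上海纪蕴数据中心）"),
    ("hd1-hd11", "HD11（浙江杭州下沙数据中心）"),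
    ("hd1-hd13", "HD13（浙江杭州央广云数据中心）"),
    ("hd1-hd15", "HD15（江苏昆山数据中心）"),
    ("hd1-hd3", "HD3（上海松江数据中心）"),
    ("hd1-hd4", "HD4（上海外高桥数据中心）"),
    ("hd1-hd5", "HD5（上海金港数据中心）"),
    ("hd1-hd6", "HD6（上海荷丹数据中心）"),
    ("hd1-hd8", "HD8（江苏南通保税区数据中心）"),
    ("hd1-hd9", "HD9（安徽宿州高新区数据中心）"),
    ("hd1-hddw1", "HDDW1（上海磐石智算数据中心）")]),
  ("hd2", [
    ("hd2-hd7", "HD7（江苏太仓基地数据中心）")]),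
  ("hn", [
    ("hn-hn1", "HN1（广东深圳花园城数据中心）"),
    ("hn-hn2", "HN2（广东深圳软件基地数据中心）"),
    ("hn-hn3", "HN3（广东广州科学城连云数据中心）"),
    ("hn-hn4", "HN4（广东佛山智慧城市数据中心）"),
    ("hn-hn5", "HN5（四川成都棕树数据中心）"),
    ("hn-hn6", "HN6（四川广元电信数据中心）"),
    ("hn-hn8", "HN8（四川成都双流算力平台数据中心）"),
    ("hn-hndw1", "HNDW1（广东广州化龙数据中心）"),
    ("hn-hndw2", "HNDW2（广东深圳盐田武浩数据中心）"),
    ("hn-hndw3", "HNDW3（广东广州亚太信息引擎数据中心）"),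
    ("hn-hndw4", "HNDW4（广东深圳盐田明珠数据中心）"),
    ("hn-hndw5", "HNDW5（四川成都天府联通数据中心）")]),
  ("hg", [
    ("hg-hgdw1", "HGDW1（浙江杭州杭钢云计算数据中心）")]),
  ("xs", [
    ("xs-xs1", "XS1（北京香山数据中心）")]),
  ("qt", [
    ("qt-hb2", "HB2（河北廊坊固安数据中心）"),
    ("qt-hb201", "HB201（乌兰基地）"),
    ("qt-qt01", "QT01（河北廊坊云基地数据中心）"),
    ("qt-qt11", "QT11（上海静安数据中心）"),
    ("qt-qt23", "QT23（北京朝阳酒仙桥百度M1数据中心）"),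
    ("qt-qt27-17", "QT27（江苏苏州国科数据中心）")])
]

def get_dcs_by_region_alt (region_id : String) : List (List (String × String)) :=
  ((PySem.Dict.mk REGION_INDEX).getD region_id []).map (fun p =>
    [("id", p.1), ("name", p.2),
     ("short", ((PySem.Str.split? p.2 "（").getD []).headD ""),   -- name.split("（")[0]: sep ≠ "" so split? = some, result nonempty, [0] = headD
     ("region_id", region_id)])

-- ===== PRECONDITION & SPEC =====
def Spec_get_dcs_by_region (region_id : String) (out : List (List (String × String))) : Prop := out = get_dcs_by_region_alt region_id
instance (region_id : String) (out : List (List (String × String))) : Decidable (Spec_get_dcs_by_region region_id out) := by unfold Spec_get_dcs_by_region; infer_instance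

-- ===== CLAIM (what is proved, stated in full; the proofs are below) =====
def Claim_equal_get_dcs_by_region : Prop := ∀ (region_id : String), Dom_get_dcs_by_region region_id → Spec_get_dcs_by_region region_id (get_dcs_by_region region_id)

-- ===== LEMMAS AND PROOFS =====
set_option maxRecDepth 100000

theorem alt_nil (r : String) (h : r ∉ ["hb1", "hb2", "hb3", "hd1", "hd2", "hn", "hg", "xs", "qt"]) :
    get_dcs_by_region_alt r = [] := by
  simp only [List.mem_cons, List.not_mem_nil, or_false, not_or] at h
  obtain ⟨h1,h2,h3,h4,h5,h6,h7,h8,h9⟩ := h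
  simp [get_dcs_by_region_alt, REGION_INDEX, PySem.Dict.getD_eq_get?_getD, PySem.Dict.get?,
    Ne.symm h1, Ne.symm h2, Ne.symm h3, Ne.symm h4, Ne.symm h5, Ne.symm h6, Ne.symm h7, Ne.symm h8, Ne.symm h9]

theorem a_nil (r : String) (h : r ∉ ["hb1", "hb2", "hb3", "hd1", "hd2", "hn", "hg", "xs", "qt"]) :
    get_dcs_by_region r = [] := by
  simp only [List.mem_cons, List.not_mem_nil, or_false, not_or] at h
  obtain ⟨h1,h2,h3,h4,h5,h6,h7,h8,h9⟩ := h
  simp [get_dcs_by_region, IDC_DATACENTERS, PySem.Dict.get?_mk_cons, PySem.List.sorted_eq_nil_iff,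
    Ne.symm h1, Ne.symm h2, Ne.symm h3, Ne.symm h4, Ne.symm h5, Ne.symm h6, Ne.symm h7, Ne.symm h8, Ne.symm h9]

-- ===== VERDICT (by name: the statement is the Claim_ definition above) =====
theorem get_dcs_by_region_spec : Claim_equal_get_dcs_by_region := by
  intro r _
  unfold Spec_get_dcs_by_region
  by_cases h : r ∈ ["hb1", "hb2", "hb3", "hd1", "hd2", "hn", "hg", "xs", "qt"]
  · simp only [List.mem_cons, List.not_mem_nil, or_false] at h
    rcases h with h|h|h|h|h|h|h|h|h <;> subst h <;> decide
  · rw [a_nil r h, alt_nil r h]
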